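-- pv_equiv track=rewrite | github.com/AllanKoder/Competitive-Programming-Training | codeforces-practice/1600s/special_permutation.py | construct_perm
-- ===== SOURCE A (Python) =====
-- import bisect
--
-- def construct_perm(n, start):
--     if n < 4: return []
--
--     arr = list(range(1, n+1))
--     current_num = start - 3
--     output = []
--     while len(arr) > 0:
--         while len(arr) > 0 and arr[-1] - current_num > 2 and current_num + 3 in arr:
--             current_num += 3
--             arr.remove(current_num)
--             output.append(current_num)
--
--         # Next num to the left min
--         if len(arr) > 0:
--             left_thing = bisect.bisect_right(arr, current_num - 2) - 1
--             if (left_thing < len(arr)):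
--                 current_num = arr[left_thing]
--                 arr.remove(current_num)
--                 output.append(current_num)
--
--     return output
-- ===== SOURCE B (Python) =====
-- def construct_perm(n, start):
--     if n < 4: return []
--     # remaining numbers are tracked as three arithmetic prefixes: for each residue
--     # r mod 3, the numbers r, r+3, ... , T[r] are still unused (T[r] = 0: class empty)
--     T = [n - ((n - r) % 3) for r in range(3)]
--     out = []
--
--     def consume(h):
--         # h is unused; emit the whole chain h, h+3, ..., top of h's class
--         r = h % 3
--         t = T[r]
--         out.extend(range(h, t + 1, 3))
--         T[r] = h - 3 if h - 3 >= 1 else 0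
--         return t
--
--     c = start - 3
--     if 1 <= c + 3 and c + 3 <= T[(c + 3) % 3]:
--         c = consume(c + 3)
--     while T[0] or T[1] or T[2]:
--         x = c - 2
--         best = 0
--         for r in range(3):
--             y = min(T[r], x)
--             if y >= 1:
--                 v = y - ((y - r) % 3)
--                 if v > best:
--                     best = v
--         if best < 1:
--             best = max(T)
--         c = consume(best)
--     return out
-- ===== Notes on version B (the rewrite author's own statement) =====
-- stated objective: faster
-- what changed: A keeps the remaining numbers in a sorted Python list and pays O(n) per greedy step for remove/membership/bisect; B keeps only three integers (the top of each residue class mod 3, whose remaining numbers always form an arithmetic prefix), computes each predecessor query by O(1) arithmetic over the three classes, and emits every +3-chain as one range chunk.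
import Mathlib
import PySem

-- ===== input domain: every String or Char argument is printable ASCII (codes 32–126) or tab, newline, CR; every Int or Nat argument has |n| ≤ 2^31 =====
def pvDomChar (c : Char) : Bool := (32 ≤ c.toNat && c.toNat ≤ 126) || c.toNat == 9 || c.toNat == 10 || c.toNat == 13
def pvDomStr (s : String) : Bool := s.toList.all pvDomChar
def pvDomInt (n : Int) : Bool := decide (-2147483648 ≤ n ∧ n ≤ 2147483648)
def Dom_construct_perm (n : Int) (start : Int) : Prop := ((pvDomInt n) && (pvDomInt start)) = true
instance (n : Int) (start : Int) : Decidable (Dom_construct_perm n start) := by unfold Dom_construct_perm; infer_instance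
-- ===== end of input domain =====

-- B replaces A's sorted list (O(n) remove / membership / bisect per step) by three integers:
-- for each residue class mod 3 the remaining numbers are a prefix r, r+3, …, T[r], so each
-- greedy step is O(1) state work plus emitting one arithmetic chunk of the output.

-- ===== PORT A =====
-- termination helper for the ports: a successful list.remove shortens the list
theorem pvRemoveLen (xs : List Int) (v : Int) (l : List Int)
    (h : PySem.List.remove? xs v = some l) : l.length < xs.length := by
  have hv : v ∈ xs := by
    by_contra hv
    rw [(PySem.List.remove?_eq_none_iff xs v).mpr hv] at h
    exact (by simp at h)
  rw [PySem.List.remove?_eq_some_erase xs v hv] at h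
  cases h
  exact List.length_erase_of_mem hv ▸ Nat.pred_lt (Nat.pos_of_ne_zero (by simpa using (List.length_pos_of_mem hv).ne')).ne'

-- the inner `while` loop of A: (arr, current_num, output) → state after the loop
def pvAInner (arr : List Int) (c : Int) (out : List Int) : List Int × Int × List Int :=
  if arr ≠ [] ∧ 2 < (PySem.List.pyGet? arr (-1)).getD 0 - c ∧ (c + 3) ∈ arr then
    match hrem : PySem.List.remove? arr (c + 3) with
    | some arr' => pvAInner arr' (c + 3) (out ++ [c + 3])
    | none => (arr, c, out)  -- unreachable: c + 3 ∈ arr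
  else (arr, c, out)
termination_by arr.length
decreasing_by exact pvRemoveLen arr (c + 3) arr' hrem

-- termination helper: the inner loop never lengthens arr
theorem pvAInnerLen (arr : List Int) (c : Int) (out : List Int) :
    (pvAInner arr c out).1.length ≤ arr.length := by
  induction arr, c, out using pvAInner.induct with
  | case1 arr c out hcond arr' hrem ih =>
      rw [pvAInner, if_pos hcond, hrem]
      exact le_of_lt (lt_of_le_of_lt ih (pvRemoveLen arr (c + 3) arr' hrem))
  | case2 arr c out hcond hrem => rw [pvAInner, if_pos hcond, hrem]
  | case3 arr c out hcond => rw [pvAInner, if_neg hcond]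

-- the outer `while` loop of A
def pvAOuter (arr : List Int) (c : Int) (out : List Int) : List Int :=
  if arr ≠ [] then
    let s := pvAInner arr c out
    if s.1 ≠ [] then
      let lt : Int := (PySem.List.bisectRight s.1 (s.2.1 - 2) : Int) - 1
      if lt < (s.1.length : Int) then
        let c₂ := (PySem.List.pyGet? s.1 lt).getD 0   -- arr[left_thing]; -1 ≤ lt < len, so in range
        match hrem : PySem.List.remove? s.1 c₂ with
        | some arr₂ => pvAOuter arr₂ c₂ (s.2.2 ++ [c₂])
        | none => s.2.2  -- unreachable: the picked element is a member of arr
      else s.2.2  -- unreachable: bisect_right ≤ len, so lt < len always holds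
    else s.2.2
  else out
termination_by arr.length
decreasing_by exact lt_of_lt_of_le (pvRemoveLen _ _ _ hrem) (pvAInnerLen arr c out)

def construct_perm (n : Int) (start : Int) : List Int :=
  if n < 4 then [] else pvAOuter (PySem.List.pyRange 1 (n + 1) 1) (start - 3) []

-- ===== PORT B =====
-- consume(h): emit the chunk h, h+3, …, T[h % 3]; return (new T, new out, old top)
def pvConsume (T : List Int) (out : List Int) (h : Int) : List Int × List Int × Int :=
  let r := PySem.Int.mod h 3
  let t := PySem.List.pyGetD T r 0
  let out' := out ++ PySem.List.pyRange h (t + 1) 3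
  let T' := T.set r.toNat (if 1 ≤ h - 3 then h - 3 else 0)
  (T', out', t)

-- termination measure for B's loop: total of the three class tops
def pvTMeasure (T : List Int) : Nat :=
  (PySem.List.pyGetD T 0 0).toNat + (PySem.List.pyGetD T 1 0).toNat + (PySem.List.pyGetD T 2 0).toNat

-- termination helper: consuming a remaining head strictly shrinks the measure
theorem pvConsumeMeasure (T : List Int) (out : List Int) (h : Int) (hlen : T.length = 3)
    (h1 : 1 ≤ h) (h2 : h ≤ PySem.List.pyGetD T (PySem.Int.mod h 3) 0) :
    pvTMeasure (pvConsume T out h).1 < pvTMeasure T := by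
  match T, hlen with
  | [t0, t1, t2], _ =>
    have hm : PySem.Int.mod h 3 = h % 3 := PySem.Int.mod_eq_emod_of_pos (by norm_num)
    have hr : h % 3 = 0 ∨ h % 3 = 1 ∨ h % 3 = 2 := by omega
    rw [hm] at h2
    simp only [pvConsume, pvTMeasure, hm]
    rcases hr with hr | hr | hr <;> rw [hr] at h2 ⊢ <;>
      simp [PySem.List.pyGetD_ofNat', List.set, List.getD] at h2 ⊢ <;>
      split_ifs <;> omega

-- the main `while` loop of B
def pvBLoop (T : List Int) (out : List Int) (c : Int) : List Int :=
  if ¬(PySem.List.pyGetD T 0 0 = 0 ∧ PySem.List.pyGetD T 1 0 = 0 ∧ PySem.List.pyGetD T 2 0 = 0) then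
    let x := c - 2
    let best := (PySem.List.pyRange 0 3 1).foldl (fun best r =>
      let y := min (PySem.List.pyGetD T r 0) x
      if 1 ≤ y then
        let v := y - PySem.Int.mod (y - r) 3
        if best < v then v else best
      else best) 0
    let best := if best < 1 then (PySem.List.max? T (fun v => v)).getD 0 else best
    if hg : T.length = 3 ∧ 1 ≤ best ∧ best ≤ PySem.List.pyGetD T (PySem.Int.mod best 3) 0 then
      -- `hg` is a totality guard only: the chosen head is always a remaining element
      let s := pvConsume T out best
      pvBLoop s.1 s.2.1 s.2.2
    else out  -- unreachable
  else out
termination_by pvTMeasure T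
decreasing_by exact pvConsumeMeasure T out _ hg.1 hg.2.1 hg.2.2

def construct_perm_alt (n : Int) (start : Int) : List Int :=
  if n < 4 then [] else
    let T := (PySem.List.pyRange 0 3 1).map (fun r => n - PySem.Int.mod (n - r) 3)
    let c := start - 3
    if 1 ≤ c + 3 ∧ c + 3 ≤ PySem.List.pyGetD T (PySem.Int.mod (c + 3) 3) 0 then
      let s := pvConsume T [] (c + 3)
      pvBLoop s.1 s.2.1 s.2.2
    else pvBLoop T [] c

-- ===== PRECONDITION & SPEC =====
def Spec_construct_perm (n : Int) (start : Int) (out : List Int) : Prop := out = construct_perm_alt n start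
instance (n : Int) (start : Int) (out : List Int) : Decidable (Spec_construct_perm n start out) := by unfold Spec_construct_perm; infer_instance

-- ===== CLAIM (what is proved, stated in full; the proofs are below) =====
def Claim_equal_construct_perm : Prop := ∀ (n : Int) (start : Int), Dom_construct_perm n start → Spec_construct_perm n start (construct_perm n start)

-- ===== LEMMAS AND PROOFS =====

-- abbreviation used only by the proofs: T[i] with default 0
def pvTg (T : List Int) (i : Int) : Int := PySem.List.pyGetD T i 0

-- well-formed top vector: length 3, each entry 0 (class empty) or a positive member of its class
def pvWf (T : List Int) : Prop :=
  T.length = 3 ∧ ∀ i : Int, 0 ≤ i → i < 3 → pvTg T i = 0 ∨ (1 ≤ pvTg T i ∧ pvTg T i % 3 = i)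

-- the simulation invariant: arr is the strictly sorted list of exactly the numbers
-- v with 1 ≤ v ≤ T[v % 3]
def pvInv (T : List Int) (arr : List Int) : Prop :=
  arr.Pairwise (· < ·) ∧ ∀ v : Int, v ∈ arr ↔ (1 ≤ v ∧ v ≤ pvTg T (v % 3))

theorem pvTg3 (t0 t1 t2 : Int) (i : Int) (h0 : 0 ≤ i) (h3 : i < 3) :
    pvTg [t0, t1, t2] i = if i = 0 then t0 else if i = 1 then t1 else t2 := by
  have : i = 0 ∨ i = 1 ∨ i = 2 := by omega
  rcases this with h | h | h <;> subst h <;> simp [pvTg, PySem.List.pyGetD_ofNat']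
theorem pvGetLastMax (arr : List Int) (hs : arr.Pairwise (· < ·)) (hne : arr ≠ []) :
    ∀ v ∈ arr, v ≤ (PySem.List.pyGet? arr (-1)).getD 0 := by
  intro v hv
  rw [PySem.List.pyGet?_neg_one, List.getLast?_eq_some_getLast hne, Option.getD_some]
  rw [List.mem_iff_getElem] at hv
  obtain ⟨i, hi, rfl⟩ := hv
  rw [List.getLast_eq_getElem]
  rcases Nat.lt_or_ge i (arr.length - 1) with h | h
  · exact le_of_lt ((List.pairwise_iff_getElem.mp hs) i (arr.length - 1) hi (by omega) h)
  · have : i = arr.length - 1 := by omega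
    subst this; rfl

theorem pvGetLastMem (arr : List Int) (hne : arr ≠ []) :
    (PySem.List.pyGet? arr (-1)).getD 0 ∈ arr := by
  rw [PySem.List.pyGet?_neg_one, List.getLast?_eq_some_getLast hne, Option.getD_some]
  exact List.getLast_mem hne

theorem pvRange3Nil (a b : Int) (h : b ≤ a) : PySem.List.pyRange a b 3 = [] := by
  rw [PySem.List.pyRange_of_pos a b (by norm_num)]
  rw [if_neg (by omega)]
  rfl

theorem pvRange3Cons (a b : Int) (h : a < b) :
    PySem.List.pyRange a b 3 = a :: PySem.List.pyRange (a + 3) b 3 := by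
  rw [PySem.List.pyRange_of_pos a b (by norm_num), PySem.List.pyRange_of_pos (a+3) b (by norm_num)]
  rw [if_pos h]
  have hk : ((b - a + 3 - 1) / 3).toNat
      = (if a + 3 < b then ((b - (a+3) + 3 - 1) / 3).toNat else 0) + 1 := by
    split_ifs with h2
    · have h3 := Int.add_mul_ediv_right (b - (a+3) + 3 - 1) 1 (by norm_num : (3:Int) ≠ 0)
      have h4 : (0:Int) ≤ (b - (a+3) + 3 - 1) / 3 := Int.ediv_nonneg (by omega) (by norm_num)
      omega
    · have h4 : (b - a + 3 - 1) / 3 = 1 := by omega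
      rw [h4]; rfl
  rw [hk, List.range_succ_eq_map]
  simp only [List.map_cons, List.map_map]
  refine congrArg₂ _ (by push_cast; ring) (List.map_congr_left fun k _ => ?_)
  simp only [Function.comp_apply]
  push_cast
  ring
theorem pvAInnerTriv (arr : List Int) (c : Int) (out : List Int) (h : (c + 3) ∉ arr) :
    pvAInner arr c out = (arr, c, out) := by
  rw [pvAInner, if_neg (by tauto)]

theorem pvOuterShift (arr : List Int) (c : Int) (out : List Int) (arr' : List Int) (c' : Int)
    (out' : List Int)
    (h1 : pvAInner arr c out = (arr', c', out'))
    (h2 : pvAInner arr' c' out' = (arr', c', out')) :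
    pvAOuter arr c out = pvAOuter arr' c' out' := by
  by_cases hne : arr ≠ []
  · by_cases hne' : arr' ≠ []
    · rw [pvAOuter, if_pos hne, pvAOuter, if_pos hne', h1, h2]
    · push_neg at hne'
      subst hne'
      rw [pvAOuter, if_pos hne, h1]
      simp [pvAOuter]
  · push_neg at hne
    subst hne
    rw [pvAInnerTriv [] c out (by simp)] at h1
    injection h1 with e1 h1
    injection h1 with e2 e3
    subst e1
    simp [← e3, pvAOuter]

theorem pvAInnerRun (t : Int) : ∀ (k : Nat) (arr : List Int) (c : Int) (out : List Int),
    arr.Pairwise (· < ·) →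
    (∀ v ∈ arr, v % 3 = (c + 3) % 3 → v ≤ t) →
    (∀ v : Int, c + 3 ≤ v → v ≤ t → v % 3 = (c + 3) % 3 → v ∈ arr) →
    t = c + 3 * k →
    pvAInner arr c out =
      (arr.filter (fun v => decide ¬(c + 3 ≤ v ∧ v ≤ t ∧ v % 3 = (c + 3) % 3)), t,
       out ++ PySem.List.pyRange (c + 3) (t + 1) 3) := by
  intro k
  induction k with
  | zero =>
    intro arr c out hs H H2 hk
    have hnot : (c + 3) ∉ arr := fun hmem => by have := H _ hmem rfl; omega
    rw [pvAInnerTriv arr c out hnot, pvRange3Nil _ _ (by omega), List.append_nil]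
    simp only [Prod.mk.injEq]
    refine ⟨(List.filter_eq_self.mpr fun v hv => ?_).symm, by push_cast at hk; omega, trivial⟩
    by_cases hcl : v % 3 = (c + 3) % 3
    · have := H v hv hcl; simp; omega
    · simp; omega
  | succ k ih =>
    intro arr c out hs H H2 hk
    have hmem : (c + 3) ∈ arr := H2 (c + 3) le_rfl (by omega) rfl
    have hne : arr ≠ [] := List.ne_nil_of_mem hmem
    have hcond : arr ≠ [] ∧ 2 < (PySem.List.pyGet? arr (-1)).getD 0 - c ∧ (c + 3) ∈ arr :=
      ⟨hne, by have h9 := pvGetLastMax arr hs hne _ hmem; omega, hmem⟩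
    have hrem : PySem.List.remove? arr (c + 3) = some (arr.erase (c + 3)) :=
      PySem.List.remove?_eq_some_erase arr _ hmem
    rw [pvAInner, if_pos hcond]
    have hred : (match hrem2 : PySem.List.remove? arr (c + 3) with
        | some arr' => pvAInner arr' (c + 3) (out ++ [c + 3])
        | none => (arr, c, out)) = pvAInner (arr.erase (c + 3)) (c + 3) (out ++ [c + 3]) := by
      split
      next arr' heq => rw [hrem] at heq; injection heq with heq; rw [heq]
      next heq => rw [hrem] at heq; exact absurd heq (by simp)
    rw [hred]
    have hnodup : arr.Nodup := hs.nodup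
    have herase : arr.erase (c + 3) = arr.filter (fun v => v != (c + 3)) :=
      hnodup.erase_eq_filter _
    have hsub : (arr.erase (c + 3)).Sublist arr := List.erase_sublist
    have ih' := ih (arr.erase (c + 3)) (c + 3) (out ++ [c + 3]) (hs.sublist hsub)
      (fun v hv hcl => H v (hsub.mem hv) (by omega))
      (fun v hv1 hv2 hcl => (hnodup.mem_erase_iff).mpr ⟨by omega, H2 v (by omega) hv2 (by omega)⟩)
      (by push_cast at hk ⊢; omega)
    rw [ih']
    simp only [Prod.mk.injEq]
    refine ⟨?_, trivial, ?_⟩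
    · rw [herase, List.filter_filter]
      refine List.filter_congr fun v hv => ?_
      by_cases hv3 : v = c + 3
      · subst hv3
        simp [show c + 3 ≤ c + 3 ∧ c + 3 ≤ t ∧ (c+3) % 3 = (c+3) % 3 from
          ⟨le_rfl, by push_cast at hk; omega, rfl⟩]
      · rw [Bool.eq_iff_iff]
        simp only [Bool.and_eq_true, Bool.or_eq_true, Bool.not_eq_true', decide_eq_false_iff_not,
          bne_iff_ne, ne_eq, decide_eq_true_eq]
        omega
    · rw [pvRange3Cons (c + 3) (t + 1) (by omega)]
      simp

def pvIsPick (arr : List Int) (x p : Int) : Prop :=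
  p ∈ arr ∧ ((∃ v ∈ arr, v ≤ x) → (p ≤ x ∧ ∀ v ∈ arr, v ≤ x → v ≤ p)) ∧
    ((∀ v ∈ arr, ¬ v ≤ x) → ∀ v ∈ arr, v ≤ p)

theorem pvPickUnique (arr : List Int) (x p q : Int)
    (hp : pvIsPick arr x p) (hq : pvIsPick arr x q) : p = q := by
  by_cases hex : ∃ v ∈ arr, v ≤ x
  · exact le_antisymm ((hq.2.1 hex).2 p hp.1 (hp.2.1 hex).1) ((hp.2.1 hex).2 q hq.1 (hq.2.1 hex).1)
  · push_neg at hex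
    have hex' : ∀ v ∈ arr, ¬ v ≤ x := fun v hv => by have := hex v hv; omega
    exact le_antisymm (hq.2.2 hex' p hp.1) (hp.2.2 hex' q hq.1)

theorem pvPickA (arr : List Int) (x : Int) (hs : arr.Pairwise (· < ·)) (hne : arr ≠ []) :
    ((PySem.List.bisectRight arr x : Int) - 1 < (arr.length : Int)) ∧
    pvIsPick arr x ((PySem.List.pyGet? arr ((PySem.List.bisectRight arr x : Int) - 1)).getD 0) := by
  obtain ⟨hk, h2, h3⟩ := PySem.List.bisectRight_spec arr x (hs.imp le_of_lt)
  have hlen : 0 < arr.length := List.length_pos_iff.mpr hne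
  refine ⟨by push_cast; omega, ?_⟩
  by_cases hk0 : PySem.List.bisectRight arr x = 0
  · rw [hk0]
    norm_num
    refine ⟨pvGetLastMem arr hne, fun hex => ?_, fun _ => pvGetLastMax arr hs hne⟩
    exfalso
    obtain ⟨v, hv, hvx⟩ := hex
    obtain ⟨j, hj, rfl⟩ := List.mem_iff_getElem.mp hv
    have := h3 j hj (by omega)
    omega
  · set k := PySem.List.bisectRight arr x with hkdef
    have hk1 : 1 ≤ k := Nat.pos_of_ne_zero hk0
    have hkl : k - 1 < arr.length := by omega
    have hget : PySem.List.pyGet? arr ((k : Int) - 1) = some arr[k-1] := by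
      rw [PySem.List.pyGet?_of_nonneg _ (by push_cast; omega)]
      have ht : ((k : Int) - 1).toNat = k - 1 := by omega
      rw [ht, List.getElem?_eq_getElem hkl]
    rw [hget, Option.getD_some]
    have hmax : ∀ v ∈ arr, v ≤ x → v ≤ arr[k-1] := by
      intro v hv hvx
      obtain ⟨j, hj, rfl⟩ := List.mem_iff_getElem.mp hv
      by_cases hjk : j < k
      · rcases Nat.lt_or_ge j (k - 1) with h | h
        · exact le_of_lt (List.pairwise_iff_getElem.mp hs j (k-1) hj hkl h)
        · have : j = k - 1 := by omega
          subst this; rfl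
      · have := h3 j hj (by omega)
        omega
    refine ⟨List.getElem_mem hkl, fun _ => ⟨h2 (k-1) hkl (by omega), hmax⟩, fun hall => ?_⟩
    exfalso
    have h0 : arr[0] ≤ x := h2 0 hlen (by omega)
    exact hall arr[0] (List.getElem_mem hlen) h0

-- one step of B's per-class candidate fold
def pvStep (T : List Int) (x b r : Int) : Int :=
  let y := min (PySem.List.pyGetD T r 0) x
  if 1 ≤ y then
    let v := y - PySem.Int.mod (y - r) 3
    if b < v then v else b
  else b

theorem pvStepEq (T : List Int) (x b r : Int) :
    pvStep T x b r = if 1 ≤ min (pvTg T r) x then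
      (if b < min (pvTg T r) x - PySem.Int.mod (min (pvTg T r) x - r) 3
       then min (pvTg T r) x - PySem.Int.mod (min (pvTg T r) x - r) 3 else b)
      else b := rfl

theorem pvStepProps (T arr : List Int) (x : Int) (hw : pvWf T) (hinv : pvInv T arr)
    (r : Int) (hr0 : 0 ≤ r) (hr3 : r < 3) (b : Int)
    (hb : b = 0 ∨ (b ∈ arr ∧ b ≤ x)) (hb0 : 0 ≤ b) :
    (pvStep T x b r = 0 ∨ (pvStep T x b r ∈ arr ∧ pvStep T x b r ≤ x)) ∧ b ≤ pvStep T x b r ∧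
      (∀ w ∈ arr, w % 3 = r → w ≤ x → w ≤ pvStep T x b r) ∧ 0 ≤ pvStep T x b r := by
  obtain ⟨hs, hmem⟩ := hinv
  have hmod : PySem.Int.mod (min (pvTg T r) x - r) 3 = (min (pvTg T r) x - r) % 3 :=
    PySem.Int.mod_eq_emod_of_pos (by norm_num)
  rw [pvStepEq, hmod]
  set y := min (pvTg T r) x with hy
  by_cases h1y : 1 ≤ y
  · rw [if_pos h1y]
    set v := y - (y - r) % 3 with hv
    have hvr : v % 3 = r := by omega
    have hwle : ∀ w ∈ arr, w % 3 = r → w ≤ x → w ≤ v := by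
      intro w hwa hwr hwx
      have := (hmem w).mp hwa
      rw [hwr] at this
      omega
    by_cases hbv : b < v
    · rw [if_pos hbv]
      have hv1 : 1 ≤ v := by omega
      have hvmem : v ∈ arr := (hmem v).mpr ⟨hv1, by rw [hvr]; omega⟩
      exact ⟨Or.inr ⟨hvmem, by omega⟩, by omega, hwle, by omega⟩
    · rw [if_neg hbv]
      exact ⟨hb, le_rfl, fun w hwa hwr hwx => le_trans (hwle w hwa hwr hwx) (by omega), hb0⟩
  · rw [if_neg h1y]
    refine ⟨hb, le_rfl, fun w hwa hwr hwx => ?_, hb0⟩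
    exfalso
    have := (hmem w).mp hwa
    rw [hwr] at this
    omega

theorem pvTgMem (T : List Int) (hlen : T.length = 3) (i : Int) (h0 : 0 ≤ i) (h3 : i < 3) :
    pvTg T i ∈ T := by
  match T, hlen with
  | [t0, t1, t2], _ =>
    rw [pvTg3 t0 t1 t2 i h0 h3]
    split_ifs <;> simp

theorem pvTgSurj (T : List Int) (hlen : T.length = 3) (m : Int) (hm : m ∈ T) :
    ∃ i : Int, 0 ≤ i ∧ i < 3 ∧ pvTg T i = m := by
  match T, hlen with
  | [t0, t1, t2], _ =>
    have hm' : m = t0 ∨ m = t1 ∨ m = t2 := by simpa using hm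
    rcases hm' with h | h | h
    · exact ⟨0, by norm_num, by rw [pvTg3 _ _ _ 0 (by norm_num) (by norm_num)]; simp [h]⟩
    · exact ⟨1, by norm_num, by rw [pvTg3 _ _ _ 1 (by norm_num) (by norm_num)]; simp [h]⟩
    · exact ⟨2, by norm_num, by rw [pvTg3 _ _ _ 2 (by norm_num) (by norm_num)]; simp [h]⟩

theorem pvPickB (T arr : List Int) (x : Int) (hw : pvWf T) (hinv : pvInv T arr) (hne : arr ≠ []) :
    pvIsPick arr x
      (if pvStep T x (pvStep T x (pvStep T x 0 0) 1) 2 < 1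
       then (PySem.List.max? T (fun v => v)).getD 0
       else pvStep T x (pvStep T x (pvStep T x 0 0) 1) 2) := by
  obtain ⟨hlen, hwf⟩ := hw
  obtain ⟨hs, hmem⟩ := hinv
  have h1 := pvStepProps T arr x ⟨hlen, hwf⟩ ⟨hs, hmem⟩ 0 (by norm_num) (by norm_num) 0
    (Or.inl rfl) le_rfl
  have h2 := pvStepProps T arr x ⟨hlen, hwf⟩ ⟨hs, hmem⟩ 1 (by norm_num) (by norm_num) _
    h1.1 h1.2.2.2
  have h3 := pvStepProps T arr x ⟨hlen, hwf⟩ ⟨hs, hmem⟩ 2 (by norm_num) (by norm_num) _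
    h2.1 h2.2.2.2
  set b3 := pvStep T x (pvStep T x (pvStep T x 0 0) 1) 2 with hb3
  have hmax : ∀ w ∈ arr, w ≤ x → w ≤ b3 := by
    intro w hwa hwx
    have hw3 : w % 3 = 0 ∨ w % 3 = 1 ∨ w % 3 = 2 := by omega
    rcases hw3 with h | h | h
    · exact le_trans (le_trans (h1.2.2.1 w hwa h hwx) h2.2.1) h3.2.1
    · exact le_trans (h2.2.2.1 w hwa h hwx) h3.2.1
    · exact h3.2.2.1 w hwa h hwx
  by_cases hex : ∃ v ∈ arr, v ≤ x
  · obtain ⟨w, hwa, hwx⟩ := hex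
    have hw1 : 1 ≤ w := ((hmem w).mp hwa).1
    have hb31 : 1 ≤ b3 := le_trans hw1 (hmax w hwa hwx)
    rw [if_neg (by omega)]
    have hb3m : b3 ∈ arr ∧ b3 ≤ x := h3.1.resolve_left (by omega)
    exact ⟨hb3m.1, fun _ => ⟨hb3m.2, hmax⟩, fun hall => absurd hwx (hall w hwa)⟩
  · have hb30 : b3 = 0 := by
      rcases h3.1 with h | h
      · exact h
      · exact absurd ⟨b3, h.1, h.2⟩ hex
    rw [if_pos (by omega)]
    have hTne : T ≠ [] := by intro h; rw [h] at hlen; simp at hlen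
    obtain ⟨m, hmq⟩ : ∃ m, PySem.List.max? T (fun v => v) = some m := by
      cases hq : PySem.List.max? T (fun v => v) with
      | none => exact absurd (((PySem.List.max?_eq_none_iff T (fun v => v)).mp hq)) hTne
      | some m => exact ⟨m, rfl⟩
    rw [hmq, Option.getD_some]
    have hmT : m ∈ T := PySem.List.max?_mem hmq
    have hmmax : ∀ y ∈ T, y ≤ m := PySem.List.max?_isMax hmq
    obtain ⟨w0, hw0⟩ := List.exists_mem_of_ne_nil arr hne
    have hw0m := (hmem w0).mp hw0
    have hw03 : 0 ≤ w0 % 3 ∧ w0 % 3 < 3 := by omega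
    have hm1 : 1 ≤ m :=
      le_trans (by omega) (le_trans hw0m.2 (hmmax _ (pvTgMem T hlen _ hw03.1 hw03.2)))
    obtain ⟨i, hi0, hi3, hieq⟩ := pvTgSurj T hlen m hmT
    have hwfi := hwf i hi0 hi3
    rw [hieq] at hwfi
    have hmi : m % 3 = i := by omega
    have hmarr : m ∈ arr := (hmem m).mpr ⟨hm1, by rw [hmi, hieq]⟩
    refine ⟨hmarr, fun hex' => absurd hex' hex, fun _ w hwa => ?_⟩
    have hwm := (hmem w).mp hwa
    have hw3 : 0 ≤ w % 3 ∧ w % 3 < 3 := by omega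
    exact le_trans hwm.2 (hmmax _ (pvTgMem T hlen _ hw3.1 hw3.2))

theorem pvTgSet (T : List Int) (hlen : T.length = 3) (j : Int) (hj0 : 0 ≤ j) (hj3 : j < 3)
    (w : Int) (i : Int) (hi0 : 0 ≤ i) (hi3 : i < 3) :
    pvTg (T.set j.toNat w) i = if i = j then w else pvTg T i := by
  match T, hlen with
  | [t0, t1, t2], _ =>
    have hj : j = 0 ∨ j = 1 ∨ j = 2 := by omega
    have hi : i = 0 ∨ i = 1 ∨ i = 2 := by omega
    rcases hj with hj | hj | hj <;> subst hj <;>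
      rcases hi with hi | hi | hi <;> subst hi <;>
      simp [pvTg, PySem.List.pyGetD_ofNat', List.set]

theorem pvConsumeBlock (T arrIn : List Int) (c : Int) (O : List Int) (vnew : Int)
    (hw : pvWf T) (hsorted : arrIn.Pairwise (· < ·))
    (hmem : ∀ v : Int, v ≠ c → (v ∈ arrIn ↔ (1 ≤ v ∧ v ≤ pvTg T (v % 3))))
    (hvchar : ∀ v : Int, v % 3 = c % 3 →
      (v ∈ arrIn ∧ v < c + 3 ↔ (1 ≤ v ∧ v ≤ vnew)))
    (hvnew : vnew = 0 ∨ (1 ≤ vnew ∧ vnew % 3 = c % 3))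
    (hvlt : vnew < c + 3) (hc1 : 1 ≤ c + 3)
    (hct : c ≤ pvTg T (c % 3) ∧ 1 ≤ pvTg T (c % 3)) :
    pvWf (T.set ((c % 3).toNat) vnew) ∧
    ∃ arr₂ : List Int,
      pvAInner arrIn c O =
        (arr₂, pvTg T (c % 3),
         O ++ PySem.List.pyRange (c + 3) (pvTg T (c % 3) + 1) 3) ∧
      pvInv (T.set ((c % 3).toNat) vnew) arr₂ ∧
      (pvTg T (c % 3) + 3) ∉ arr₂ ∧ arr₂.length ≤ arrIn.length := by
  obtain ⟨hlen, hwf⟩ := hw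
  set r := c % 3 with hr
  set t := pvTg T r with ht
  have hr03 : 0 ≤ r ∧ r < 3 := by omega
  have htr : t % 3 = r := by
    rcases hwf r hr03.1 hr03.2 with h | h
    · omega
    · exact h.2
  have hk : ∃ k : Nat, t = c + 3 * (k : Int) := ⟨((t - c) / 3).toNat, by omega⟩
  obtain ⟨k, hkeq⟩ := hk
  have hrun := pvAInnerRun t k arrIn c O hsorted
    (fun v hv hcl => by
      by_cases hvc : v = c
      · omega
      · have h8 := (hmem v hvc).mp hv
        have hcl' : v % 3 = r := by omega
        rw [hcl', ← ht] at h8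
        omega)
    (fun v hv1 hv2 hcl => (hmem v (by omega)).mpr
      ⟨by omega, by rw [show v % 3 = r from by omega]; exact ht ▸ hv2⟩)
    hkeq
  have hwf' : pvWf (T.set (r.toNat) vnew) := by
    refine ⟨by rw [List.length_set]; exact hlen, fun i hi0 hi3 => ?_⟩
    rw [pvTgSet T hlen r hr03.1 hr03.2 vnew i hi0 hi3]
    by_cases hir : i = r
    · rw [if_pos hir]
      rcases hvnew with h | h
      · exact Or.inl h
      · exact Or.inr ⟨h.1, by omega⟩
    · rw [if_neg hir]
      exact hwf i hi0 hi3
  refine ⟨hwf', _, hrun, ⟨List.Pairwise.sublist List.filter_sublist hsorted, fun v => ?_⟩,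
    fun hmem2 => ?_, List.Sublist.length_le List.filter_sublist⟩
  · rw [List.mem_filter]
    have hv3 : 0 ≤ v % 3 ∧ v % 3 < 3 := by omega
    rw [pvTgSet T hlen r hr03.1 hr03.2 vnew (v % 3) hv3.1 hv3.2]
    by_cases hcl : v % 3 = r
    · rw [if_pos hcl]
      have hvch := hvchar v hcl
      constructor
      · rintro ⟨hva, hpd⟩
        simp only [decide_eq_true_eq] at hpd
        have hvle : v ≤ t := by
          by_cases hvc : v = c
          · omega
          · have h8 := (hmem v hvc).mp hva
            rw [hcl, ← ht] at h8
            omega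
        exact hvch.mp ⟨hva, by omega⟩
      · intro hvn
        have := hvch.mpr hvn
        refine ⟨this.1, by simp only [decide_eq_true_eq]; omega⟩
    · rw [if_neg hcl]
      have hvc : v ≠ c := by
        intro h
        subst h
        omega
      rw [← hmem v hvc]
      constructor
      · exact fun h => h.1
      · intro h
        refine ⟨h, by simp only [decide_eq_true_eq]; omega⟩
  · rw [List.mem_filter] at hmem2
    obtain ⟨hva, hpd⟩ := hmem2
    simp only [decide_eq_true_eq] at hpd
    have hcl : (t + 3) % 3 = r := by omega
    have hvle : t + 3 ≤ t := by
      have h8 := (hmem (t + 3) (by omega)).mp hva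
      rw [hcl, ← ht] at h8
      omega
    omega

theorem pvSimEmpty (T : List Int) (c : Int) (out : List Int) (hw : pvWf T)
    (hinv : pvInv T []) : pvAOuter [] c out = pvBLoop T out c := by
  have hz : ∀ i : Int, 0 ≤ i → i < 3 → pvTg T i = 0 := by
    intro i hi0 hi3
    rcases hw.2 i hi0 hi3 with h | h
    · exact h
    · exact absurd ((hinv.2 (pvTg T i)).mpr ⟨h.1, by rw [h.2]⟩) (List.not_mem_nil)
  have hA : pvAOuter [] c out = out := by rw [pvAOuter]; simp
  have hB : pvBLoop T out c = out := by
    rw [pvBLoop,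
      if_neg (not_not_intro ⟨hz 0 (by norm_num) (by norm_num), hz 1 (by norm_num) (by norm_num),
        hz 2 (by norm_num) (by norm_num)⟩)]
  rw [hA, hB]

theorem pvSim : ∀ (N : Nat) (arr T : List Int) (c : Int) (out : List Int),
    arr.length ≤ N → pvWf T → pvInv T arr → (c + 3) ∉ arr →
    pvAOuter arr c out = pvBLoop T out c := by
  intro N
  induction N with
  | zero =>
    intro arr T c out hN hw hinv hc3
    have harr : arr = [] := by cases arr with | nil => rfl | cons a l => simp at hN
    subst harr
    exact pvSimEmpty T c out hw hinv
  | succ N ih =>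
    intro arr T c out hN hw hinv hc3
    by_cases hne : arr = []
    · subst hne; exact pvSimEmpty T c out hw hinv
    · have hne' : arr ≠ [] := hne
      obtain ⟨hs, hm⟩ := hinv
      have htriv := pvAInnerTriv arr c out hc3
      obtain ⟨hlt, hpA⟩ := pvPickA arr (c - 2) hs hne'
      have hpB := pvPickB T arr (c - 2) hw ⟨hs, hm⟩ hne'
      set p := (PySem.List.pyGet? arr ((PySem.List.bisectRight arr (c - 2) : Int) - 1)).getD 0
        with hp
      have hpeq := pvPickUnique arr (c - 2) _ _ hpB hpA
      have hpmem : p ∈ arr := hpA.1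
      have hp1 : 1 ≤ p := ((hm p).mp hpmem).1
      have hpt : p ≤ pvTg T (p % 3) := ((hm p).mp hpmem).2
      have hrem : PySem.List.remove? arr p = some (arr.erase p) :=
        PySem.List.remove?_eq_some_erase arr p hpmem
      have hnodup := hs.nodup
      -- A takes one outer step: pick p, erase it
      have hstep : pvAOuter arr c out = pvAOuter (arr.erase p) p (out ++ [p]) := by
        rw [pvAOuter, if_pos hne']
        simp only [htriv]
        rw [if_pos hne', if_pos hlt, ← hp]
        split
        next arr₂ heq =>
          simp only [htriv] at heq
          rw [← hp, hrem] at heq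
          injection heq with heq
          rw [← heq]
        next heq =>
          simp only [htriv] at heq
          rw [← hp, hrem] at heq
          exact absurd heq (by simp)
      -- the consume block from p
      have hblock := pvConsumeBlock T (arr.erase p) p (out ++ [p])
        (if 1 ≤ p - 3 then p - 3 else 0) hw (hs.sublist List.erase_sublist)
        (fun v hvc => by
          rw [hnodup.mem_erase_iff]
          constructor
          · exact fun h => (hm v).mp h.2
          · exact fun h => ⟨hvc, (hm v).mpr h⟩)
        (fun v hcl => by
          rw [hnodup.mem_erase_iff, hm v]
          constructor
          · rintro ⟨⟨hvp, hv1, hvle⟩, hv3⟩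
            rw [hcl] at hvle
            split_ifs <;> omega
          · rintro ⟨hv1, hvn⟩
            have hvle : v ≤ pvTg T (v % 3) := by rw [hcl]; split_ifs at hvn <;> omega
            refine ⟨⟨by split_ifs at hvn <;> omega, hv1, hvle⟩, by split_ifs at hvn <;> omega⟩)
        (by
          split_ifs with h
          · exact Or.inr ⟨by omega, by omega⟩
          · exact Or.inl rfl)
        (by split_ifs <;> omega) (by omega) ⟨hpt, by omega⟩
      obtain ⟨hwf', arr₂, hchain, hinv₂, hnot₂, hlen₂⟩ := hblock
      set t := pvTg T (p % 3) with ht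
      set out₂ := out ++ [p] ++ PySem.List.pyRange (p + 3) (t + 1) 3 with hout₂
      have hshift : pvAOuter (arr.erase p) p (out ++ [p]) = pvAOuter arr₂ t out₂ :=
        pvOuterShift _ _ _ _ _ _ hchain (pvAInnerTriv _ _ _ hnot₂)
      have hlen₃ : arr₂.length ≤ N := by
        have h1 := List.length_erase_of_mem hpmem
        have h2 := List.length_pos_iff.mpr hne'
        omega
      have hIH := ih arr₂ (T.set ((p % 3).toNat) (if 1 ≤ p - 3 then p - 3 else 0)) t out₂
        hlen₃ hwf' hinv₂ hnot₂
      -- B takes one loop step: same pick, consume the chunk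
      have hmodp : PySem.Int.mod p 3 = p % 3 := PySem.Int.mod_eq_emod_of_pos (by norm_num)
      have hBcond : ¬(PySem.List.pyGetD T 0 0 = 0 ∧ PySem.List.pyGetD T 1 0 = 0 ∧
          PySem.List.pyGetD T 2 0 = 0) := by
        rintro ⟨h0, h1, h2⟩
        have hpt' : p ≤ pvTg T (p % 3) := ht ▸ hpt
        have h03 : p % 3 = 0 ∨ p % 3 = 1 ∨ p % 3 = 2 := by omega
        rcases h03 with h | h | h <;> rw [h] at hpt'
        · exact absurd hpt' (by rw [show pvTg T 0 = PySem.List.pyGetD T 0 0 from rfl, h0]; omega)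
        · exact absurd hpt' (by rw [show pvTg T 1 = PySem.List.pyGetD T 1 0 from rfl, h1]; omega)
        · exact absurd hpt' (by rw [show pvTg T 2 = PySem.List.pyGetD T 2 0 from rfl, h2]; omega)
      have hfold : (PySem.List.pyRange 0 3 1).foldl (fun best r =>
          let y := min (PySem.List.pyGetD T r 0) (c - 2)
          if 1 ≤ y then
            let v := y - PySem.Int.mod (y - r) 3
            if best < v then v else best
          else best) 0 = pvStep T (c - 2) (pvStep T (c - 2) (pvStep T (c - 2) 0 0) 1) 2 := rfl
      have hB : pvBLoop T out c = pvBLoop (T.set ((p % 3).toNat)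
          (if 1 ≤ p - 3 then p - 3 else 0)) out₂ t := by
        rw [pvBLoop, if_pos hBcond]
        simp only [hfold, hpeq]
        rw [dif_pos ⟨hw.1, hp1, by rw [hmodp]; exact hpt⟩]
        simp only [pvConsume, hmodp]
        rw [show PySem.List.pyGetD T (p % 3) 0 = t from rfl]
        rw [pvRange3Cons p (t + 1) (by omega), hout₂]
        simp
      rw [hstep, hshift, hIH, hB]


theorem construct_perm_eq (n start : Int) : construct_perm n start = construct_perm_alt n start := by
  by_cases hn : n < 4
  · rw [construct_perm, construct_perm_alt, if_pos hn, if_pos hn]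
  · rw [construct_perm, if_neg hn, construct_perm_alt, if_neg hn]
    have hn4 : 4 ≤ n := by omega
    set T0 := (PySem.List.pyRange 0 3 1).map (fun r => n - PySem.Int.mod (n - r) 3) with hT0
    have hT0eq : T0 = [n - PySem.Int.mod (n - 0) 3, n - PySem.Int.mod (n - 1) 3,
        n - PySem.Int.mod (n - 2) 3] := by rw [hT0]; rfl
    have hg : ∀ i : Int, 0 ≤ i → i < 3 → pvTg T0 i = n - (n - i) % 3 := by
      intro i h0 h3
      have hi : i = 0 ∨ i = 1 ∨ i = 2 := by omega
      rcases hi with hi | hi | hi <;> subst hi <;>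
        rw [hT0eq, pvTg3 _ _ _ _ (by norm_num) (by norm_num)] <;>
        norm_num <;> rw [PySem.Int.mod_eq_emod_of_pos (by norm_num)]
    have hlen : T0.length = 3 := by rw [hT0eq]; rfl
    have hwf : pvWf T0 := ⟨hlen, fun i h0 h3 =>
      Or.inr ⟨by rw [hg i h0 h3]; omega, by rw [hg i h0 h3]; omega⟩⟩
    set arr0 := PySem.List.pyRange 1 (n + 1) 1 with harr0
    have hinv : pvInv T0 arr0 := by
      refine ⟨PySem.List.pairwise_lt_pyRange_one 1 (n + 1), fun v => ?_⟩
      rw [harr0, PySem.List.mem_pyRange_one]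
      have hv3 : 0 ≤ v % 3 ∧ v % 3 < 3 := by omega
      rw [hg (v % 3) hv3.1 hv3.2]
      omega
    by_cases hb : 1 ≤ start - 3 + 3 ∧ start - 3 + 3 ≤
        PySem.List.pyGetD T0 (PySem.Int.mod (start - 3 + 3) 3) 0
    · rw [if_pos hb]
      have hmods : PySem.Int.mod start 3 = start % 3 :=
        PySem.Int.mod_eq_emod_of_pos (by norm_num)
      have hb1 : 1 ≤ start := by have := hb.1; omega
      have hb2 : start ≤ pvTg T0 (start % 3) := by
        have h8 := hb.2
        rw [show start - 3 + 3 = start from by ring, hmods] at h8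
        exact h8
      have hblock := pvConsumeBlock T0 arr0 (start - 3) []
        (if 1 ≤ start - 3 then start - 3 else 0) hwf hinv.1
        (fun v _ => hinv.2 v)
        (fun v hcl => by
          rw [hinv.2 v]
          have hv3 : 0 ≤ v % 3 ∧ v % 3 < 3 := by omega
          rw [hg (v % 3) hv3.1 hv3.2]
          have hst3 : 0 ≤ start % 3 ∧ start % 3 < 3 := by omega
          rw [hg (start % 3) hst3.1 hst3.2] at hb2
          split_ifs <;> omega)
        (by
          split_ifs with h
          · exact Or.inr ⟨by omega, by omega⟩
          · exact Or.inl rfl)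
        (by split_ifs <;> omega) (by omega)
        (by
          rw [show (start - 3) % 3 = start % 3 from by omega]
          exact ⟨by omega, by omega⟩)
      obtain ⟨hwf', arr₂, hchain, hinv₂, hnot₂, hlen₂⟩ := hblock
      rw [show (start - 3) % 3 = start % 3 from by omega] at hchain hinv₂ hnot₂ hwf'
      rw [show start - 3 + 3 = start from by ring] at hchain
      have hshift := pvOuterShift _ _ _ _ _ _ hchain (pvAInnerTriv _ _ _ hnot₂)
      have hsim := pvSim arr₂.length arr₂
        (T0.set ((start % 3).toNat) (if 1 ≤ start - 3 then start - 3 else 0))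
        (pvTg T0 (start % 3)) ([] ++ PySem.List.pyRange start (pvTg T0 (start % 3) + 1) 3)
        le_rfl hwf' hinv₂ hnot₂
      rw [hshift, hsim]
      simp only [pvConsume, show start - 3 + 3 = start from by ring, hmods]
      rfl
    · rw [if_neg hb]
      have hnotmem : (start - 3) + 3 ∉ arr0 := by
        intro hmem
        have h8 := (hinv.2 _).mp hmem
        have hst3 : 0 ≤ (start - 3 + 3) % 3 ∧ (start - 3 + 3) % 3 < 3 := by omega
        refine hb ⟨by omega, ?_⟩
        rw [PySem.Int.mod_eq_emod_of_pos (by norm_num)]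
        exact h8.2
      exact pvSim arr0.length arr0 T0 (start - 3) [] le_rfl hwf hinv hnotmem

-- ===== VERDICT (by name: the statement is the Claim_ definition above) =====
theorem construct_perm_spec : Claim_equal_construct_perm := by
  intro n start _
  unfold Spec_construct_perm
  exact construct_perm_eq n start
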